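-- pv_equiv track=rewrite | github.com/Lauryneodarih/CSE-6242-project | find_sentences_inMIND.py | get_1quote_from_split
-- ===== SOURCE A (Python) =====
-- def get_1quote_from_split(word, sentences, max_length = 120):
--     word_with_spaces = ' '+ word + ' '
--     quote = "No example found"
--     for sentence in sentences:
--         if (word_with_spaces in sentence and len(sentence) <= max_length):
--             quote = str(sentence)
--             continue
--     return quote
-- ===== SOURCE B (Python) =====
-- def get_1quote_from_split(word, sentences, max_length=120):
--     word_with_spaces = ' ' + word + ' '
--     for sentence in reversed(list(sentences)):
--         if word_with_spaces in sentence and len(sentence) <= max_length: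
--             return str(sentence)
--     return "No example found"
-- ===== Notes on version B (the rewrite author's own statement) =====
-- stated objective: alternative
-- what changed: A scans every sentence forward and keeps overwriting the result; B traverses the materialised list in reverse and returns at the first (= last overall) match, terminating early.
import Mathlib
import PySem

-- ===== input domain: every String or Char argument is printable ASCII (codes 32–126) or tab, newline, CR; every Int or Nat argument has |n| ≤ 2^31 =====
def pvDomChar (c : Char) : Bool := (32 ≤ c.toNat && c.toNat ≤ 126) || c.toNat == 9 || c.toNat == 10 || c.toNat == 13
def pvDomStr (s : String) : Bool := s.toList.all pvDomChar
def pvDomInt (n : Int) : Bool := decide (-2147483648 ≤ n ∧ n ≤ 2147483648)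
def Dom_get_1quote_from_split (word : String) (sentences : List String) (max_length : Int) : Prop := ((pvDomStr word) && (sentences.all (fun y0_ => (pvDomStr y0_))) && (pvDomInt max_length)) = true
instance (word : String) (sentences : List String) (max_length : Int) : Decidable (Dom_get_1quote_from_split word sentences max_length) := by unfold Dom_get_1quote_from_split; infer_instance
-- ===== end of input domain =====

-- B changes the traversal: reverse scan with early return instead of a full forward scan that overwrites; same result (the last short sentence containing the word).

-- ===== PORT A =====
-- the test 'word_with_spaces in sentence and len(sentence) <= max_length'
def pvHit (wws sentence : String) (max_length : Int) : Bool :=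
  PySem.Str.isIn wws sentence && decide ((PySem.Str.len sentence : Int) ≤ max_length)

def get_1quote_from_split (word : String) (sentences : List String) (max_length : Int) : String :=
  let word_with_spaces := " " ++ word ++ " "
  sentences.foldl (fun quote sentence =>
    if pvHit word_with_spaces sentence max_length then sentence else quote)
    "No example found"

-- ===== PORT B =====
-- 'for sentence in reversed(list(sentences)): if …: return str(sentence)' then the default
def pvAltLoop (wws : String) (max_length : Int) : List String → String
  | [] => "No example found"
  | sentence :: rest =>
      if pvHit wws sentence max_length then sentence else pvAltLoop wws max_length rest

def get_1quote_from_split_alt (word : String) (sentences : List String) (max_length : Int) : String :=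
  let word_with_spaces := " " ++ word ++ " "
  pvAltLoop word_with_spaces max_length sentences.reverse

-- ===== PRECONDITION & SPEC =====
def Spec_get_1quote_from_split (word : String) (sentences : List String) (max_length : Int) (out : String) : Prop := out = get_1quote_from_split_alt word sentences max_length
instance (word : String) (sentences : List String) (max_length : Int) (out : String) : Decidable (Spec_get_1quote_from_split word sentences max_length out) := by unfold Spec_get_1quote_from_split; infer_instance

-- ===== CLAIM (what is proved, stated in full; the proofs are below) =====
def Claim_equal_get_1quote_from_split : Prop := ∀ (word : String) (sentences : List String) (max_length : Int), Dom_get_1quote_from_split word sentences max_length → Spec_get_1quote_from_split word sentences max_length (get_1quote_from_split word sentences max_length)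

-- ===== LEMMAS AND PROOFS =====

-- overwriting forward fold = first match of the reversed list
theorem pvFoldl_eq_altLoop (wws : String) (m : Int) (l : List String) :
    l.foldl (fun q s => if pvHit wws s m then s else q) "No example found"
      = pvAltLoop wws m l.reverse := by
  induction l using List.reverseRecOn with
  | nil => rfl
  | append_singleton t x ih =>
      simp [List.foldl_append, List.reverse_append, pvAltLoop, ih]

-- ===== VERDICT (by name: the statement is the Claim_ definition above) =====
theorem get_1quote_from_split_spec : Claim_equal_get_1quote_from_split := by
  intro word sentences max_length _
  unfold Spec_get_1quote_from_split get_1quote_from_split get_1quote_from_split_alt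
  exact pvFoldl_eq_altLoop _ _ _
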